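-- pv_equiv track=rewrite | github.com/ManuelAlejandro20/TalleresYTareasBD | Progra/Desafio 4/Desafio4_2.py | funcionrangohoras
-- ===== SOURCE A (Python) =====
-- def funcionrangohoras(horasleidas):
--     contador1 = 0
--     contador2 = 0
--     contador3 = 0
--     contador4 = 0
--     contador5 = 0
--     contador6 = 0
--     contador7 = 0
--     contador8 = 0
--     contador9 = 0
--     contador10 = 0
--     contador11 = 0
--     contador12 = 0
--
--     for hora in horasleidas:
--         if(hora >= 0 and hora < 2):
--             contador1 += 1
--         elif(hora >= 2 and hora < 4):
--             contador2 += 1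
--         elif(hora >= 4 and hora < 6):
--             contador3 += 1
--         elif(hora >= 6 and hora < 8):
--             contador4 += 1
--         elif(hora >= 8 and hora < 10):
--             contador5 += 1
--         elif(hora >= 10 and hora < 12):
--             contador6 += 1
--         elif(hora >= 12 and hora < 14):
--             contador7 += 1
--         elif(hora >= 14 and hora < 16):
--             contador8 += 1
--         elif(hora >= 16 and hora < 18):
--             contador9 += 1
--         elif(hora >= 18 and hora < 20):
--             contador10 += 1
--         elif(hora >= 20 and hora < 22):
--             contador11 += 1
--         elif(hora >= 22 and hora < 24):
--             contador12 += 1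
--
--     rango = ''
--     maximo = -9999
--     if(contador1 > maximo):
--         maximo = contador1
--         rango = '00:00am - 02:00am'
--     if(contador2 > maximo):
--         maximo = contador2
--         rango = '02:00am - 04:00am'
--     if(contador3 > maximo):
--         maximo = contador3
--         rango = '04:00am - 06:00am'
--     if(contador4 > maximo):
--         maximo = contador4
--         rango = '06:00am - 08:00am'
--     if(contador5 > maximo):
--         maximo = contador5
--         rango = '08:00am - 10:00am'
--     if(contador6 > maximo):
--         maximo = contador6
--         rango = '10:00am - 12:00pm'
--     if(contador7 > maximo):
--         maximo = contador7
--         rango = '12:00pm - 14:00apm'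
--     if(contador8 > maximo):
--         maximo = contador8
--         rango = '14:00pm - 16:00pm'
--     if(contador9 > maximo):
--         maximo = contador9
--         rango = '16:00pm - 18:00pm'
--     if(contador10 > maximo):
--         maximo = contador10
--         rango = '18:00pm - 20:00pm'
--     if(contador11 > maximo):
--         maximo = contador11
--         rango = '20:00pm - 22:00pm'
--     if(contador12 > maximo):
--         maximo = contador12
--         rango = '22:00pm - 00:00am'
--
--     resultado = [maximo, rango]
--     return resultado
-- ===== SOURCE B (Python) =====
-- LABELS = ['00:00am - 02:00am', '02:00am - 04:00am', '04:00am - 06:00am',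
--           '06:00am - 08:00am', '08:00am - 10:00am', '10:00am - 12:00pm',
--           '12:00pm - 14:00apm', '14:00pm - 16:00pm', '16:00pm - 18:00pm',
--           '18:00pm - 20:00pm', '20:00pm - 22:00pm', '22:00pm - 00:00am']
--
-- def funcionrangohoras(horasleidas):
--     def count(i):
--         return sum(1 for h in horasleidas if 2 * i <= h < 2 * (i + 1))
--     best = max(range(12), key=count)
--     return [count(best), LABELS[best]]
-- ===== Notes on version B (the rewrite author's own statement) =====
-- stated objective: alternative
-- what changed: Instead of A's single pass accumulating 12 named counters through an if/elif cascade and then a 12-block max-update chain, B computes each bin's count on demand with a per-bin filtered-sum pass and selects the winning bin with max(range(12), key=count) (first-wins argmax over bin indices), returning [count(best), LABELS[best]].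
import Mathlib
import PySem

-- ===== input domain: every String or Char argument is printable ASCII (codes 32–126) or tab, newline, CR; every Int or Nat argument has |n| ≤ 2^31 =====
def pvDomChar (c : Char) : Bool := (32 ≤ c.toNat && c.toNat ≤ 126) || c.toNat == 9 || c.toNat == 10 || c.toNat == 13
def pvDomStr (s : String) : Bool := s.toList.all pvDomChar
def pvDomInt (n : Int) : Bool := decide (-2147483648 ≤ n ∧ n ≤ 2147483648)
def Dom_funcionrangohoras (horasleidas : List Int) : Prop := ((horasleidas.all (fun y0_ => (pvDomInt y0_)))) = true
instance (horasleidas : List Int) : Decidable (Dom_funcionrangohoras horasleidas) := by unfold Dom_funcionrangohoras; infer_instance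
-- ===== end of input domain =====

-- B replaces A's single-pass 12-counter if/elif cascade and copy-pasted max-update chain by
-- per-bin filtered-sum counting plus max(range(12), key=count) argmax (objective: alternative).


-- ===== PORT A =====
-- A's 12 counter variables as one record (transliteration of the 12 locals)
structure AState where
  c1 : Int
  c2 : Int
  c3 : Int
  c4 : Int
  c5 : Int
  c6 : Int
  c7 : Int
  c8 : Int
  c9 : Int
  c10 : Int
  c11 : Int
  c12 : Int
deriving Repr, DecidableEq

-- one iteration of A's for-loop: the 12-way if/elif cascade
def aStep (s : AState) (hora : Int) : AState :=
  if hora ≥ 0 ∧ hora < 2 then { s with c1 := s.c1 + 1 }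
  else if hora ≥ 2 ∧ hora < 4 then { s with c2 := s.c2 + 1 }
  else if hora ≥ 4 ∧ hora < 6 then { s with c3 := s.c3 + 1 }
  else if hora ≥ 6 ∧ hora < 8 then { s with c4 := s.c4 + 1 }
  else if hora ≥ 8 ∧ hora < 10 then { s with c5 := s.c5 + 1 }
  else if hora ≥ 10 ∧ hora < 12 then { s with c6 := s.c6 + 1 }
  else if hora ≥ 12 ∧ hora < 14 then { s with c7 := s.c7 + 1 }
  else if hora ≥ 14 ∧ hora < 16 then { s with c8 := s.c8 + 1 }
  else if hora ≥ 16 ∧ hora < 18 then { s with c9 := s.c9 + 1 }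
  else if hora ≥ 18 ∧ hora < 20 then { s with c10 := s.c10 + 1 }
  else if hora ≥ 20 ∧ hora < 22 then { s with c11 := s.c11 + 1 }
  else if hora ≥ 22 ∧ hora < 24 then { s with c12 := s.c12 + 1 }
  else s

-- one of A's twelve 'if contadorK > maximo' blocks
def aMaxStep (mr : Int × String) (c : Int) (lbl : String) : Int × String :=
  if c > mr.1 then (c, lbl) else mr

def funcionrangohoras (horasleidas : List Int) : Int × String :=
  let s := horasleidas.foldl aStep ⟨0,0,0,0,0,0,0,0,0,0,0,0⟩
  aMaxStep (aMaxStep (aMaxStep (aMaxStep (aMaxStep (aMaxStep (aMaxStep (aMaxStep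
    (aMaxStep (aMaxStep (aMaxStep (aMaxStep (-9999, "")
      s.c1 "00:00am - 02:00am") s.c2 "02:00am - 04:00am") s.c3 "04:00am - 06:00am")
      s.c4 "06:00am - 08:00am") s.c5 "08:00am - 10:00am") s.c6 "10:00am - 12:00pm")
      s.c7 "12:00pm - 14:00apm") s.c8 "14:00pm - 16:00pm") s.c9 "16:00pm - 18:00pm")
      s.c10 "18:00pm - 20:00pm") s.c11 "20:00pm - 22:00pm") s.c12 "22:00pm - 00:00am"

-- ===== PORT B =====
def bLabels : List String :=
  ["00:00am - 02:00am", "02:00am - 04:00am", "04:00am - 06:00am",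
   "06:00am - 08:00am", "08:00am - 10:00am", "10:00am - 12:00pm",
   "12:00pm - 14:00apm", "14:00pm - 16:00pm", "16:00pm - 18:00pm",
   "18:00pm - 20:00pm", "20:00pm - 22:00pm", "22:00pm - 00:00am"]

-- count(i) = sum(1 for h in horasleidas if 2*i <= h < 2*(i+1))
def bCount (horasleidas : List Int) (i : Int) : Int :=
  horasleidas.foldl (fun acc h => if 2 * i ≤ h ∧ h < 2 * (i + 1) then acc + 1 else acc) 0

-- max(range(12), key=count): seed with the first element, update on strictly greater key
def funcionrangohoras_alt (horasleidas : List Int) : Int × String :=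
  let best := (PySem.List.pyRange 1 12 1).foldl
    (fun b i => if bCount horasleidas i > bCount horasleidas b then i else b) (0 : Int)
  (bCount horasleidas best, bLabels.getD best.toNat "")

-- ===== PRECONDITION & SPEC =====
def Spec_funcionrangohoras (horasleidas : List Int) (out : Int × String) : Prop := out = funcionrangohoras_alt horasleidas
instance (horasleidas : List Int) (out : Int × String) : Decidable (Spec_funcionrangohoras horasleidas out) := by unfold Spec_funcionrangohoras; infer_instance

-- ===== CLAIM (what is proved, stated in full; the proofs are below) =====
def Claim_equal_funcionrangohoras : Prop := ∀ (horasleidas : List Int), Dom_funcionrangohoras horasleidas → Spec_funcionrangohoras horasleidas (funcionrangohoras horasleidas)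

-- ===== LEMMAS AND PROOFS =====
def lblOf (i : Int) : String := bLabels.getD i.toNat ""

theorem bCount_shift (i : Int) (l : List Int) : ∀ (a : Int),
    l.foldl (fun acc h => if 2 * i ≤ h ∧ h < 2 * (i + 1) then acc + 1 else acc) a
      = a + l.foldl (fun acc h => if 2 * i ≤ h ∧ h < 2 * (i + 1) then acc + 1 else acc) 0 := by
  induction l with
  | nil => intro a; simp
  | cons h t ih =>
      intro a
      simp only [List.foldl]
      rw [ih, ih (if 2 * i ≤ h ∧ h < 2 * (i + 1) then (0:Int) + 1 else 0)]
      split_ifs <;> omega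

theorem bCount_cons (i h : Int) (t : List Int) :
    bCount (h :: t) i = (if 2 * i ≤ h ∧ h < 2 * (i + 1) then 1 else 0) + bCount t i := by
  simp only [bCount, List.foldl]
  rw [bCount_shift]
  split_ifs <;> omega

theorem bCount_nonneg (l : List Int) (i : Int) : 0 ≤ bCount l i := by
  induction l with
  | nil => simp [bCount]
  | cons h t ih => rw [bCount_cons]; split_ifs <;> omega

def ind (h k : Int) : Int := if 2 * k ≤ h ∧ h < 2 * (k + 1) then 1 else 0

theorem aStep_eq (s : AState) (h : Int) :
    aStep s h = ⟨s.c1 + ind h 0, s.c2 + ind h 1, s.c3 + ind h 2, s.c4 + ind h 3,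
                 s.c5 + ind h 4, s.c6 + ind h 5, s.c7 + ind h 6, s.c8 + ind h 7,
                 s.c9 + ind h 8, s.c10 + ind h 9, s.c11 + ind h 10, s.c12 + ind h 11⟩ := by
  by_cases hb : 0 ≤ h ∧ h < 24
  · obtain ⟨h1, h2⟩ := hb
    interval_cases h <;> simp [aStep, ind]
  · have hz : ∀ k : Int, 0 ≤ k → k < 12 → ind h k = 0 := by
      intro k hk1 hk2; unfold ind; rw [if_neg (by omega)]
    unfold aStep
    rw [if_neg (by omega : ¬(h ≥ 0 ∧ h < 2)),
        if_neg (by omega : ¬(h ≥ 2 ∧ h < 4)),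
        if_neg (by omega : ¬(h ≥ 4 ∧ h < 6)),
        if_neg (by omega : ¬(h ≥ 6 ∧ h < 8)),
        if_neg (by omega : ¬(h ≥ 8 ∧ h < 10)),
        if_neg (by omega : ¬(h ≥ 10 ∧ h < 12)),
        if_neg (by omega : ¬(h ≥ 12 ∧ h < 14)),
        if_neg (by omega : ¬(h ≥ 14 ∧ h < 16)),
        if_neg (by omega : ¬(h ≥ 16 ∧ h < 18)),
        if_neg (by omega : ¬(h ≥ 18 ∧ h < 20)),
        if_neg (by omega : ¬(h ≥ 20 ∧ h < 22)),
        if_neg (by omega : ¬(h ≥ 22 ∧ h < 24)),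
        hz 0 (by norm_num) (by norm_num), hz 1 (by norm_num) (by norm_num),
        hz 2 (by norm_num) (by norm_num), hz 3 (by norm_num) (by norm_num),
        hz 4 (by norm_num) (by norm_num), hz 5 (by norm_num) (by norm_num),
        hz 6 (by norm_num) (by norm_num), hz 7 (by norm_num) (by norm_num),
        hz 8 (by norm_num) (by norm_num), hz 9 (by norm_num) (by norm_num),
        hz 10 (by norm_num) (by norm_num), hz 11 (by norm_num) (by norm_num)]
    simp

theorem foldA (l : List Int) (s : AState) :
    l.foldl aStep s =
      ⟨s.c1 + bCount l 0, s.c2 + bCount l 1, s.c3 + bCount l 2, s.c4 + bCount l 3,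
       s.c5 + bCount l 4, s.c6 + bCount l 5, s.c7 + bCount l 6, s.c8 + bCount l 7,
       s.c9 + bCount l 8, s.c10 + bCount l 9, s.c11 + bCount l 10, s.c12 + bCount l 11⟩ := by
  induction l generalizing s with
  | nil =>
      have hz : ∀ i : Int, bCount ([] : List Int) i = 0 := fun _ => rfl
      simp [hz]
  | cons h t ih =>
      simp only [List.foldl]
      rw [ih, aStep_eq]
      simp only [AState.mk.injEq, bCount_cons, ind]
      refine ⟨?_, ?_, ?_, ?_, ?_, ?_, ?_, ?_, ?_, ?_, ?_, ?_⟩ <;> exact add_assoc _ _ _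

theorem sel (c : Int → Int) (lbl : Int → String) (idxs : List Int) (b : Int) :
    idxs.foldl (fun mr i => aMaxStep mr (c i) (lbl i)) (c b, lbl b)
      = (c (idxs.foldl (fun bb i => if c i > c bb then i else bb) b),
         lbl (idxs.foldl (fun bb i => if c i > c bb then i else bb) b)) := by
  induction idxs generalizing b with
  | nil => rfl
  | cons i t ih =>
      simp only [List.foldl, aMaxStep]
      split_ifs
      · exact ih i
      · exact ih b

-- ===== VERDICT (by name: the statement is the Claim_ definition above) =====
theorem funcionrangohoras_spec : Claim_equal_funcionrangohoras := by
  intro l _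
  unfold Spec_funcionrangohoras funcionrangohoras funcionrangohoras_alt
  rw [foldA]
  have hrange : PySem.List.pyRange 1 12 1 = [1,2,3,4,5,6,7,8,9,10,11] := by decide
  rw [hrange]
  simp only [zero_add]
  have h0 : aMaxStep (-9999, "") (bCount l 0) "00:00am - 02:00am"
      = (bCount l 0, lblOf 0) := by
    unfold aMaxStep
    rw [if_pos (by have := bCount_nonneg l 0; omega)]
    rfl
  rw [h0]
  have hchain :
      aMaxStep (aMaxStep (aMaxStep (aMaxStep (aMaxStep (aMaxStep (aMaxStep (aMaxStep
        (aMaxStep (aMaxStep (aMaxStep (bCount l 0, lblOf 0)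
          (bCount l 1) "02:00am - 04:00am") (bCount l 2) "04:00am - 06:00am")
          (bCount l 3) "06:00am - 08:00am") (bCount l 4) "08:00am - 10:00am")
          (bCount l 5) "10:00am - 12:00pm") (bCount l 6) "12:00pm - 14:00apm")
          (bCount l 7) "14:00pm - 16:00pm") (bCount l 8) "16:00pm - 18:00pm")
          (bCount l 9) "18:00pm - 20:00pm") (bCount l 10) "20:00pm - 22:00pm")
          (bCount l 11) "22:00pm - 00:00am"
      = ([1,2,3,4,5,6,7,8,9,10,11] : List Int).foldl
          (fun mr i => aMaxStep mr (bCount l i) (lblOf i)) (bCount l 0, lblOf 0) := rfl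
  rw [hchain, sel (bCount l) lblOf]
  rfl
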